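-- pv_equiv track=rewrite | github.com/nothingtosurprise/Helios | tools/gradio/comparison/gradio_compare_diff-ckpt.py | get_step_idx_mapping
-- ===== SOURCE A (Python) =====
-- def get_step_idx_mapping(common_keys):
--     """Extract step and idx mapping from common (step, idx) keys"""
--     step_idx_map = {}  # {step: [idx1, idx2, ...]}
--     all_steps = set()
--     all_indices = set()
--
--     for step, idx in common_keys:
--         all_steps.add(step)
--         all_indices.add(idx)
--         if step not in step_idx_map:
--             step_idx_map[step] = []
--         step_idx_map[step].append(idx)
--
--     # Sort
--     for step in step_idx_map:
--         step_idx_map[step].sort()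
--
--     return sorted(all_steps), sorted(all_indices), step_idx_map
-- ===== SOURCE B (Python) =====
-- def get_step_idx_mapping(common_keys):
--     """Extract step and idx mapping from common (step, idx) keys"""
--     # Sort all pairs once (lexicographically); distributing the idxs of the
--     # sorted pairs into buckets then yields each bucket already sorted,
--     # removing the per-bucket sort pass.
--     pairs = sorted(common_keys)
--     step_idx_map = {step: [] for step in dict.fromkeys(s for s, _ in common_keys)}
--     for step, idx in pairs:
--         step_idx_map[step].append(idx)
--     all_steps = sorted(step_idx_map)
--     all_indices = sorted({idx for _, idx in common_keys})
--     return all_steps, all_indices, step_idx_map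
-- ===== Notes on version B (the rewrite author's own statement) =====
-- stated objective: alternative
-- what changed: A hashes pairs into per-step buckets in input order and then sorts every bucket separately; B sorts the whole pair list once and distributes the idxs of the sorted pairs into pre-created buckets, so each bucket is already sorted and the per-bucket sort pass disappears.
import Mathlib
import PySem

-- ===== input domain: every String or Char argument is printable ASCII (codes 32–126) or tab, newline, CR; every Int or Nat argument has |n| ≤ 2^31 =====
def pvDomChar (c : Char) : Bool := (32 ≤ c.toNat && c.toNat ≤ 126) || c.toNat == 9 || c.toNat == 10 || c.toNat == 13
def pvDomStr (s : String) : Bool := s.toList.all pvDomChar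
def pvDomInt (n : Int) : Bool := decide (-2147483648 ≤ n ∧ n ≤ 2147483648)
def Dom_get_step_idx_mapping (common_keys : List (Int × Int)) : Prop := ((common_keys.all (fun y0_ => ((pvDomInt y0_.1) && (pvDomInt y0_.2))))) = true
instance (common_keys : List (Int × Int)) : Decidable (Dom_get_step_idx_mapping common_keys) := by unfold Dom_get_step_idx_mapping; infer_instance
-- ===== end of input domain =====

-- B replaces A's hash-then-sort-each-bucket strategy by one global sort of the pairs followed by a
-- single distribution pass (buckets come out already sorted); same return value, alternative algorithm.

-- ===== PORT A =====
def get_step_idx_mapping (common_keys : List (Int × Int)) : List Int × List Int × (List (Int × List Int)) :=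
  -- one loop building all_steps, all_indices and the step→idxs dict
  let st := common_keys.foldl
    (fun (s : PySem.Set Int × PySem.Set Int × PySem.Dict Int (List Int)) p =>
      (PySem.Set.add s.1 p.1,
       PySem.Set.add s.2.1 p.2,
       (if (s.2.2).contains p.1 then s.2.2 else (s.2.2).insert p.1 []).modify p.1 []
         (fun l => l ++ [p.2])))
    (PySem.Set.empty, PySem.Set.empty, PySem.Dict.empty)
  -- 'for step in step_idx_map: step_idx_map[step].sort()'
  let m := (st.2.2).keys.foldl
    (fun d k => d.modify k [] (fun l => PySem.List.sorted l (fun x => x))) st.2.2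
  (PySem.List.sorted st.1 (fun x => x), PySem.List.sorted st.2.1 (fun x => x), m.items)

-- ===== PORT B =====
def get_step_idx_mapping_alt (common_keys : List (Int × Int)) : List Int × List Int × (List (Int × List Int)) :=
  -- pairs = sorted(common_keys)
  let pairs := PySem.List.sorted2 common_keys (fun p => p.1) (fun p => p.2)
  -- step_idx_map = {step: [] for step in dict.fromkeys(s for s, _ in common_keys)}
  let m0 := (PySem.List.dedup (common_keys.map (fun p => p.1))).foldl
    (fun d s => d.insert s ([] : List Int)) PySem.Dict.empty
  -- for step, idx in pairs: step_idx_map[step].append(idx)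
  let m := pairs.foldl (fun d p => d.modify p.1 [] (fun l => l ++ [p.2])) m0
  let all_steps := PySem.List.sorted m.keys (fun x => x)
  let all_indices := PySem.List.sorted (PySem.Set.ofList (common_keys.map (fun p => p.2))) (fun x => x)
  (all_steps, all_indices, m.items)

-- ===== PRECONDITION & SPEC =====
def Spec_get_step_idx_mapping (common_keys : List (Int × Int)) (out : List Int × List Int × (List (Int × List Int))) : Prop := out = get_step_idx_mapping_alt common_keys
instance (common_keys : List (Int × Int)) (out : List Int × List Int × (List (Int × List Int))) : Decidable (Spec_get_step_idx_mapping common_keys out) := by unfold Spec_get_step_idx_mapping; infer_instance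

-- ===== CLAIM (what is proved, stated in full; the proofs are below) =====
def Claim_equal_get_step_idx_mapping : Prop := ∀ (common_keys : List (Int × Int)), Dom_get_step_idx_mapping common_keys → Spec_get_step_idx_mapping common_keys (get_step_idx_mapping common_keys)

-- ===== LEMMAS AND PROOFS =====

-- the lexicographic order Python's tuple sort realises
def pvLex (a b : Int × Int) : Prop := a.1 < b.1 ∨ (a.1 = b.1 ∧ a.2 ≤ b.2)

lemma pv_pairwise_insertBy (before : Int × Int → Int × Int → Bool)
    (h1 : ∀ a b, before a b = true → pvLex a b) (h2 : ∀ a b, before a b = false → pvLex b a)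
    (x : Int × Int) : ∀ (l : List (Int × Int)), l.Pairwise pvLex →
    (PySem.List.insertBy before x l).Pairwise pvLex := by
  have htr : ∀ a b c : Int × Int, pvLex a b → pvLex b c → pvLex a c := by
    intro a b c hab hbc; unfold pvLex at *; omega
  intro l
  induction l with
  | nil => intro _; simp [PySem.List.insertBy]
  | cons y ys ih =>
    intro hp
    rw [List.pairwise_cons] at hp
    by_cases hb : before x y = true
    · simp only [PySem.List.insertBy, hb, if_true]
      refine List.pairwise_cons.2 ⟨?_, List.pairwise_cons.2 ⟨hp.1, hp.2⟩⟩
      intro z hz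
      rcases List.mem_cons.1 hz with rfl | hz'
      · exact h1 _ _ hb
      · exact htr _ _ _ (h1 _ _ hb) (hp.1 z hz')
    · simp only [PySem.List.insertBy, hb]
      refine List.pairwise_cons.2 ⟨?_, ih hp.2⟩
      intro z hz
      rcases (PySem.List.mem_insertBy before x z ys).1 hz with rfl | hz'
      · exact h2 _ _ (by simpa using hb)
      · exact hp.1 z hz'

lemma pv_pairwise_sorted2 (xs : List (Int × Int)) :
    (PySem.List.sorted2 xs (fun p => p.1) (fun p => p.2)).Pairwise pvLex := by
  unfold PySem.List.sorted2
  simp only []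
  have h1 : ∀ a b : Int × Int,
      (decide (a.1 < b.1) || (!decide (b.1 < a.1) && decide (a.2 < b.2))) = true → pvLex a b := by
    intro a b h; simp at h; unfold pvLex; omega
  have h2 : ∀ a b : Int × Int,
      (decide (a.1 < b.1) || (!decide (b.1 < a.1) && decide (a.2 < b.2))) = false → pvLex b a := by
    intro a b h; simp at h; unfold pvLex; omega
  have : ∀ (l acc : List (Int × Int)), acc.Pairwise pvLex →
      (l.foldl (fun acc x => PySem.List.insertBy
        (fun a b => decide (a.1 < b.1) || (!decide (b.1 < a.1) && decide (a.2 < b.2))) x acc) acc).Pairwise pvLex := by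
    intro l
    induction l with
    | nil => intro acc h; simpa using h
    | cons x t ih =>
      intro acc h
      exact ih _ (pv_pairwise_insertBy _ h1 h2 x acc h)
  exact this xs [] (by simp)

-- the sorted-pairs bucket of a step is the sorted bucket of the original pairs
lemma pv_bucket_sorted (xs : List (Int × Int)) (s : Int) :
    ((PySem.List.sorted2 xs (fun p => p.1) (fun p => p.2)).filter (fun p => p.1 == s)).map (fun p => p.2)
      = PySem.List.sorted ((xs.filter (fun p => p.1 == s)).map (fun p => p.2)) (fun x => x) := by
  apply Eq.symm
  apply PySem.List.sorted_id_eq_of_perm_of_pairwise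
  · exact ((PySem.List.sorted2_perm xs _ _ false).filter _).map _
  · rw [List.pairwise_map]
    refine List.Pairwise.imp_of_mem ?_ ((pv_pairwise_sorted2 xs).filter _)
    intro a b ha hb hab
    have ha' := List.of_mem_filter ha
    have hb' := List.of_mem_filter hb
    simp at ha' hb'
    unfold pvLex at hab; omega

-- folding 'd[k] = sorted(d.get(k, []))' over a key list, for c in that list
lemma pv_getD_foldl_modify_sort (ks : List Int) :
    ∀ (d : PySem.Dict Int (List Int)) (c : Int),
    (ks.foldl (fun d k => d.modify k [] (fun l => PySem.List.sorted l (fun x => x))) d).getD c []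
      = if c ∈ ks then PySem.List.sorted (d.getD c []) (fun x => x) else d.getD c [] := by
  induction ks with
  | nil => intro d c; simp
  | cons k t ih =>
    intro d c
    simp only [List.foldl_cons, ih, PySem.Dict.getD_modify]
    by_cases hc : c = k
    · subst hc
      by_cases hm : c ∈ t <;> simp [hm, PySem.List.sorted_sorted]
    · by_cases hm : c ∈ t <;> simp [hm, hc]

lemma pv_update_self (xs : List Int) : ∀ (s : PySem.Set Int), (∀ x ∈ xs, x ∈ s) →
    PySem.Set.update s xs = s := by
  induction xs with
  | nil => intro s _; rfl
  | cons x t ih =>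
    intro s h
    have : PySem.Set.update s (x :: t) = PySem.Set.update (PySem.Set.add s x) t := rfl
    rw [this, PySem.Set.add_of_mem (h x (by simp))]
    exact ih s (fun y hy => h y (by simp [hy]))

-- A's combined guard-insert-append update is the plain 'd[k] = d.get(k, []) + [v]' update
lemma pv_guard_modify (d : PySem.Dict Int (List Int)) (p : Int × Int) :
    (if d.contains p.1 then d else d.insert p.1 []).modify p.1 [] (fun l => l ++ [p.2])
      = d.modify p.1 [] (fun l => l ++ [p.2]) := by
  by_cases h : d.contains p.1
  · simp [h]
  · simp only [h]
    show (d.insert p.1 []).insert p.1 ((d.insert p.1 []).getD p.1 [] ++ [p.2])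
        = d.insert p.1 (d.getD p.1 [] ++ [p.2])
    rw [PySem.Dict.getD_insert_self, PySem.Dict.insert_insert_self,
        PySem.Dict.getD_of_not_contains d [] (by simpa using h)]

-- ===== VERDICT (by name: the statement is the Claim_ definition above) =====
theorem get_step_idx_mapping_spec : Claim_equal_get_step_idx_mapping := by
  intro xs _
  show get_step_idx_mapping xs = get_step_idx_mapping_alt xs
  unfold get_step_idx_mapping get_step_idx_mapping_alt
  -- split A's three-component fold into three independent folds
  rw [PySem.List.foldl_prod_mk
        (f := fun (s : PySem.Set Int) (p : Int × Int) => PySem.Set.add s p.1)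
        (g := fun (s : PySem.Set Int × PySem.Dict Int (List Int)) (p : Int × Int) =>
          (PySem.Set.add s.1 p.2,
           (if (s.2).contains p.1 then s.2 else (s.2).insert p.1 []).modify p.1 []
             (fun l => l ++ [p.2]))),
      PySem.List.foldl_prod_mk
        (f := fun (s : PySem.Set Int) (p : Int × Int) => PySem.Set.add s p.2)
        (g := fun (d : PySem.Dict Int (List Int)) (p : Int × Int) =>
          (if d.contains p.1 then d else d.insert p.1 []).modify p.1 [] (fun l => l ++ [p.2]))]
  simp only []
  -- A's dict loop is the plain modify loop
  have hfold : xs.foldl (fun (d : PySem.Dict Int (List Int)) p =>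
        (if d.contains p.1 then d else d.insert p.1 []).modify p.1 [] (fun l => l ++ [p.2]))
        PySem.Dict.empty
      = xs.foldl (fun (d : PySem.Dict Int (List Int)) p =>
        d.modify p.1 [] (fun l => l ++ [p.2])) PySem.Dict.empty :=
    PySem.List.foldl_congr_mem xs _ _ _ (fun d p _ => pv_guard_modify d p)
  rw [hfold]
  -- name the two dicts
  set pairs := PySem.List.sorted2 xs (fun p => p.1) (fun p => p.2) with hpairs
  set D := xs.foldl (fun (d : PySem.Dict Int (List Int)) p => d.modify p.1 [] (fun l => l ++ [p.2]))
      PySem.Dict.empty with hD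
  set m0 := (PySem.List.dedup (xs.map (fun p => p.1))).foldl
      (fun (d : PySem.Dict Int (List Int)) s => d.insert s ([] : List Int)) PySem.Dict.empty with hm0
  set M := pairs.foldl (fun (d : PySem.Dict Int (List Int)) p => d.modify p.1 [] (fun l => l ++ [p.2])) m0 with hM
  -- the two step sets
  have hsteps : xs.foldl (fun (s : PySem.Set Int) p => PySem.Set.add s p.1) PySem.Set.empty
      = PySem.Set.ofList (xs.map (fun p => p.1)) := by
    rw [← PySem.Set.update_map_eq_foldl_add]
    exact PySem.Set.update_nil_left _
  have hidx : xs.foldl (fun (s : PySem.Set Int) p => PySem.Set.add s p.2) PySem.Set.empty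
      = PySem.Set.ofList (xs.map (fun p => p.2)) := by
    rw [← PySem.Set.update_map_eq_foldl_add]
    exact PySem.Set.update_nil_left _
  -- keys of the dicts
  have hDkeys : D.keys = PySem.Set.ofList (xs.map (fun p => p.1)) := by
    rw [hD, PySem.Dict.keys_foldl_modify_key xs (fun p => p.1) [] (fun _ p l => l ++ [p.2]),
        PySem.Dict.keys_empty, PySem.Set.update_nil_left]
  have hm0items : m0.items = (PySem.Set.ofList (xs.map (fun p => p.1))).map (fun s => (s, ([] : List Int))) := by
    rw [hm0, PySem.Dict.items_foldl_insert_fresh _ (fun s => s) (fun _ => ([] : List Int))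
          PySem.Dict.empty (fun a _ => PySem.Dict.contains_empty a)
          (by simp)]
    simp [show PySem.Dict.empty.items = ([] : List (Int × List Int)) from rfl]
  have hm0keys : m0.keys = PySem.Set.ofList (xs.map (fun p => p.1)) := by
    show m0.items.map (fun p => p.1) = _
    rw [hm0items]; simp [Function.comp_def]
  have hMkeys : M.keys = PySem.Set.ofList (xs.map (fun p => p.1)) := by
    rw [hM, PySem.Dict.keys_foldl_modify_key pairs (fun p => p.1) [] (fun _ p l => l ++ [p.2]),
        hm0keys]
    apply pv_update_self
    intro x hx
    simp only [List.mem_map] at hx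
    obtain ⟨p, hp, rfl⟩ := hx
    exact (PySem.Set.mem_ofList _ _).2 (List.mem_map_of_mem
      ((PySem.List.sorted2_perm xs _ _ false).mem_iff.1 hp))
  -- values
  have hm0getD : ∀ c, m0.getD c [] = [] := by
    intro c
    by_cases h : m0.contains c
    · have hc : c ∈ m0.keys := (PySem.Dict.contains_iff_mem_keys m0 c).1 h
      rw [hm0keys] at hc
      have : (c, ([] : List Int)) ∈ m0.items := by
        rw [hm0items]; exact List.mem_map_of_mem hc
      exact PySem.Dict.getD_of_mem_items m0 this
        (by rw [hm0keys]; exact PySem.Set.nodup_ofList _) []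
    · exact PySem.Dict.getD_of_not_contains m0 [] (by simpa using h)
  have hDgetD : ∀ c, D.getD c [] = (xs.filter (fun p => p.1 == c)).map (fun p => p.2) := by
    intro c
    rw [hD, PySem.Dict.getD_foldl_modify_append, PySem.Dict.getD_empty]
    simp
  have hMgetD : ∀ c, M.getD c [] = PySem.List.sorted (D.getD c []) (fun x => x) := by
    intro c
    rw [hM, PySem.Dict.getD_foldl_modify_append, hm0getD, hDgetD, List.nil_append, hpairs]
    exact pv_bucket_sorted xs c
  -- the sorted dict on A's side
  have hnodup : D.keys.Nodup := by rw [hDkeys]; exact PySem.Set.nodup_ofList _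
  set M2 := D.keys.foldl (fun (d : PySem.Dict Int (List Int)) k =>
      d.modify k [] (fun l => PySem.List.sorted l (fun x => x))) D with hM2
  have hM2keys : M2.keys = D.keys := by
    rw [hM2, PySem.Dict.keys_foldl_modify D.keys []
          (fun _ k l => PySem.List.sorted l (fun x => x)) D]
    exact pv_update_self _ _ (fun x hx => hx)
  have hM2getD : ∀ c ∈ D.keys, M2.getD c [] = PySem.List.sorted (D.getD c []) (fun x => x) := by
    intro c hc
    rw [hM2, pv_getD_foldl_modify_sort, if_pos hc]
  -- items agree
  have hitems : M2.items = M.items := by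
    rw [PySem.Dict.items_eq_map_keys M2 (by rw [hM2keys]; exact hnodup) [],
        PySem.Dict.items_eq_map_keys M (by rw [hMkeys]; exact PySem.Set.nodup_ofList _) [],
        hM2keys, hMkeys, hDkeys]
    apply List.map_congr_left
    intro k hk
    rw [hM2getD k (by rw [hDkeys]; exact hk), hMgetD]
  rw [hsteps, hidx, hMkeys, hitems]
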